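-- pv_equiv track=rewrite | github.com/CKone/tanx-game | tanx_game/pygame/soundscape.py | _candidate_drivers
-- ===== SOURCE A (Python) =====
-- from typing import Dict, Optional
--
-- def _candidate_drivers(original: Optional[str]) -> list[Optional[str]]:
--     if original:
--         return [original]
--     ordered: list[Optional[str]] = [
--         None,
--         "pulse",
--         "pipewire",
--         "alsa",
--         "coreaudio",
--         "directsound",
--         "wasapi",
--         "winmm",
--         "dsp",
--         "dummy",
--     ]
--     seen: set[Optional[str]] = set()
--     result: list[Optional[str]] = []
--     for driver in ordered:
--         if driver in seen:
--             continue
--         seen.add(driver)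
--         result.append(driver)
--     if result[-1] != "dummy":
--         result.append("dummy")
--     return result
-- ===== SOURCE B (Python) =====
-- from typing import Optional
--
-- def _candidate_drivers(original: Optional[str]) -> list[Optional[str]]:
--     if original:
--         return [original]
--     middle = "pulse pipewire alsa coreaudio directsound wasapi winmm dsp".split()
--     return [None, *middle, "dummy"]
-- ===== Notes on version B (the rewrite author's own statement) =====
-- stated objective: simpler
-- what changed: Replaced A's accumulate-and-deduplicate pass with a seen set plus conditional trailing append by assembling the list directly: None, the middle drivers obtained by splitting one space-separated string, and a fixed trailing dummy.
import Mathlib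
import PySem

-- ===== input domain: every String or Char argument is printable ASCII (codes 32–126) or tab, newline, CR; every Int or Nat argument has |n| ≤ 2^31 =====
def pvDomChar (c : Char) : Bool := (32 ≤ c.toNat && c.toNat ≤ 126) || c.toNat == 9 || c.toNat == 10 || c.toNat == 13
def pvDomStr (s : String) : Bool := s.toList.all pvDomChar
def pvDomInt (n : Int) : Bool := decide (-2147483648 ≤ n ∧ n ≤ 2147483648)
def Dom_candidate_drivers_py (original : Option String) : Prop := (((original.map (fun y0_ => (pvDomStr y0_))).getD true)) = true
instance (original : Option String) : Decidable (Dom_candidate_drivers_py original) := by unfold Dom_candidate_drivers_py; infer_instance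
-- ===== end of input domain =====

-- B assembles the list directly (None, split of a constant string, trailing "dummy") instead of A's seen-set dedup loop and conditional append (objective: simpler).


-- ===== PORT A =====
-- literal transliteration of A: build `ordered`, dedup with a seen set, append "dummy" if missing
def candidate_drivers_py (original : Option String) : List (Option String) :=
  if (match original with | some s => !(s == "") | none => false) then
    [original]
  else
    let ordered : List (Option String) :=
      [none, some "pulse", some "pipewire", some "alsa", some "coreaudio",
       some "directsound", some "wasapi", some "winmm", some "dsp", some "dummy"]
    let sr :=
      ordered.foldl (fun (sr : PySem.Set (Option String) × List (Option String)) driver =>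
        if PySem.Set.contains sr.1 driver then sr
        else (PySem.Set.add sr.1 driver, sr.2 ++ [driver]))
        (PySem.Set.ofList [], [])
    let result := sr.2
    -- result[-1]: result is provably nonempty; pyGet? = none (IndexError) is unreachable
    if PySem.List.pyGet? result (-1) ≠ some (some "dummy") then result ++ [some "dummy"]
    else result

-- ===== PORT B =====
-- B: None, then the middle drivers from splitting one constant string, then "dummy"
def candidate_drivers_py_alt (original : Option String) : List (Option String) :=
  if (match original with | some s => !(s == "") | none => false) then
    [original]
  else
    let middle := PySem.Str.split₀ "pulse pipewire alsa coreaudio directsound wasapi winmm dsp"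
    [none] ++ middle.map some ++ [some "dummy"]

-- ===== PRECONDITION & SPEC =====
def Spec_candidate_drivers_py (original : Option String) (out : List (Option String)) : Prop := out = candidate_drivers_py_alt original
instance (original : Option String) (out : List (Option String)) : Decidable (Spec_candidate_drivers_py original out) := by unfold Spec_candidate_drivers_py; infer_instance

-- ===== CLAIM =====
def Claim_equal_candidate_drivers_py : Prop := ∀ (original : Option String), Dom_candidate_drivers_py original → Spec_candidate_drivers_py original (candidate_drivers_py original)

-- ===== LEMMAS AND PROOFS =====

-- ===== VERDICT =====
theorem candidate_drivers_py_spec : Claim_equal_candidate_drivers_py := by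
  intro original _
  unfold Spec_candidate_drivers_py candidate_drivers_py candidate_drivers_py_alt
  cases original with
  | none => decide
  | some s =>
    by_cases h : s = ""
    · subst h; decide
    · simp [h]
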